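-- pv_equiv track=rewrite | github.com/bhanvinayer/CodeChron-OS | backend/block_parser.py | get_block_suggestions
-- ===== SOURCE A (Python) =====
-- from typing import List, Dict, Any
--
-- def get_block_suggestions(current_blocks: List[Dict]) -> List[Dict]:
--     """Get suggestions for next blocks based on current context"""
--
--     suggestions = []
--
--     # Analyze current blocks to suggest relevant next blocks
--     has_variable = any(b.get('type') == 'variable' for b in current_blocks)
--     has_function = any(b.get('type') == 'function' for b in current_blocks)
--     has_ui = any(b.get('type') in ['button', 'input', 'slider'] for b in current_blocks)
--
--     if not has_variable:
--         suggestions.append({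
--             "type": "variable",
--             "reason": "Consider adding variables to store data"
--         })
--
--     if has_variable and not has_function:
--         suggestions.append({
--             "type": "function",
--             "reason": "Create functions to process your variables"
--         })
--
--     if not has_ui:
--         suggestions.append({
--             "type": "button",
--             "reason": "Add buttons for user interaction"
--         })
--
--     return suggestions
-- ===== SOURCE B (Python) =====
-- # Data-driven rewrite: map block types to categories, collect the set of
-- # present categories in one pass, then select suggestions from a rules table.
--
-- _CATEGORY = {
--     'variable': 'variable',
--     'function': 'function',
--     'button': 'ui',
--     'input': 'ui',
--     'slider': 'ui',
-- }
--
-- _RULES = [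
--     (lambda p: 'variable' not in p,
--      {"type": "variable", "reason": "Consider adding variables to store data"}),
--     (lambda p: 'variable' in p and 'function' not in p,
--      {"type": "function", "reason": "Create functions to process your variables"}),
--     (lambda p: 'ui' not in p,
--      {"type": "button", "reason": "Add buttons for user interaction"}),
-- ]
--
-- def get_block_suggestions(current_blocks):
--     """Get suggestions for next blocks based on current context (rules table over a category set)."""
--     present = set()
--     for b in current_blocks:
--         c = _CATEGORY.get(b.get('type'))
--         if c is not None:
--             present.add(c)
--     return [dict(sugg) for cond, sugg in _RULES if cond(present)]
-- ===== Notes on version B (the rewrite author's own statement) =====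
-- stated objective: alternative
-- what changed: B replaces A's three hard-coded any(...) scans and inline appends with a data-driven design: a type-to-category table, a single pass collecting the set of present categories, and a constant rules table of (predicate, suggestion) pairs filtered against that set.
import Mathlib
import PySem

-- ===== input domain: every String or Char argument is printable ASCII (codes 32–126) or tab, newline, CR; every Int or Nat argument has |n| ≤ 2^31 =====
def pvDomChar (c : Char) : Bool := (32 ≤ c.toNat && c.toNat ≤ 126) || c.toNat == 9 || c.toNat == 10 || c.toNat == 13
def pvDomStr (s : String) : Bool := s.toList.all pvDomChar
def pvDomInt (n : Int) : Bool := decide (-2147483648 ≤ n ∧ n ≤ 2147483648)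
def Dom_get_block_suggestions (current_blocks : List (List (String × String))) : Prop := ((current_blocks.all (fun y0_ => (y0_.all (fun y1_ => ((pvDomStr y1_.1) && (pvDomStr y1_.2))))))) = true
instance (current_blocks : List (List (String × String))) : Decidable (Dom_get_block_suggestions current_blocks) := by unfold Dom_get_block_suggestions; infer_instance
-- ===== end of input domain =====

-- B is a data-driven rewrite: a type→category table, one pass collecting the set of
-- present categories, and a constant rules table filtered against that set.
-- ===== PORT A =====
-- b.get('type') on an assoc-list dict: first match, none if absent (None == 'x' is False in Python).
def pvGetType (b : List (String × String)) : Option String := b.lookup "type"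

def get_block_suggestions (current_blocks : List (List (String × String))) : List (List (String × String)) :=
  let suggestions : List (List (String × String)) := []
  let has_variable := current_blocks.any (fun b => pvGetType b == some "variable")
  let has_function := current_blocks.any (fun b => pvGetType b == some "function")
  let has_ui := current_blocks.any (fun b =>
    pvGetType b == some "button" || pvGetType b == some "input" || pvGetType b == some "slider")
  let suggestions := if !has_variable then
      suggestions ++ [[("type", "variable"), ("reason", "Consider adding variables to store data")]]
    else suggestions
  let suggestions := if has_variable && !has_function then
      suggestions ++ [[("type", "function"), ("reason", "Create functions to process your variables")]]
    else suggestions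
  let suggestions := if !has_ui then
      suggestions ++ [[("type", "button"), ("reason", "Add buttons for user interaction")]]
    else suggestions
  suggestions

-- ===== PORT B =====
-- _CATEGORY.get(t): association lookup in the literal type→category table (none if absent).
def pvCategory (t : Option String) : Option String :=
  if t == some "variable" then some "variable"
  else if t == some "function" then some "function"
  else if t == some "button" then some "ui"
  else if t == some "input" then some "ui"
  else if t == some "slider" then some "ui"
  else none

-- loop body: present.add(c) when the category lookup hits
def pvAddCat (s : PySem.Set String) (b : List (String × String)) : PySem.Set String :=
  match pvCategory (pvGetType b) with
  | some c => PySem.Set.add s c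
  | none => s

-- _RULES: (predicate on the present-category set, suggestion) pairs
def pvRules : List ((PySem.Set String → Bool) × List (String × String)) :=
  [ (fun p => !(PySem.Set.contains p "variable"),
      [("type", "variable"), ("reason", "Consider adding variables to store data")]),
    (fun p => PySem.Set.contains p "variable" && !(PySem.Set.contains p "function"),
      [("type", "function"), ("reason", "Create functions to process your variables")]),
    (fun p => !(PySem.Set.contains p "ui"),
      [("type", "button"), ("reason", "Add buttons for user interaction")]) ]

def get_block_suggestions_alt (current_blocks : List (List (String × String))) : List (List (String × String)) :=
  let present := current_blocks.foldl pvAddCat PySem.Set.empty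
  (pvRules.filter (fun r => r.1 present)).map Prod.snd

-- ===== PRECONDITION & SPEC =====
def Spec_get_block_suggestions (current_blocks : List (List (String × String))) (out : List (List (String × String))) : Prop := out = get_block_suggestions_alt current_blocks
instance (current_blocks : List (List (String × String))) (out : List (List (String × String))) : Decidable (Spec_get_block_suggestions current_blocks out) := by unfold Spec_get_block_suggestions; infer_instance

-- ===== CLAIM =====
def Claim_equal_get_block_suggestions : Prop := ∀ (current_blocks : List (List (String × String))), Dom_get_block_suggestions current_blocks → Spec_get_block_suggestions current_blocks (get_block_suggestions current_blocks)

-- ===== LEMMAS AND PROOFS =====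
theorem bool_eq_of_iff {a b : Bool} (h : a = true ↔ b = true) : a = b := by
  cases a <;> cases b <;> simp_all

theorem mem_foldl_pvAddCat (xs : List (List (String × String))) (s : PySem.Set String)
    (y : String) :
    y ∈ xs.foldl pvAddCat s ↔ y ∈ s ∨ ∃ b ∈ xs, pvCategory (pvGetType b) = some y := by
  induction xs generalizing s with
  | nil => simp
  | cons x xs ih =>
    simp only [List.foldl_cons, ih, List.mem_cons]
    unfold pvAddCat
    cases h : pvCategory (pvGetType x) with
    | none =>
      constructor
      · rintro (h' | ⟨b, hb, hc⟩)
        · exact Or.inl h'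
        · exact Or.inr ⟨b, Or.inr hb, hc⟩
      · rintro (h' | ⟨b, rfl | hb, hc⟩)
        · exact Or.inl h'
        · rw [h] at hc; cases hc
        · exact Or.inr ⟨b, hb, hc⟩
    | some c =>
      rw [PySem.Set.mem_add]
      constructor
      · rintro ((h' | rfl) | ⟨b, hb, hc⟩)
        · exact Or.inl h'
        · exact Or.inr ⟨x, Or.inl rfl, h⟩
        · exact Or.inr ⟨b, Or.inr hb, hc⟩
      · rintro (h' | ⟨b, hb | hb, hc⟩)
        · exact Or.inl (Or.inl h')
        · subst hb; rw [h] at hc; exact Or.inl (Or.inr (Option.some_injective _ hc).symm)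
        · exact Or.inr ⟨b, hb, hc⟩

-- the present-set membership tests are exactly A's three any(...) scans
theorem contains_present (cbs : List (List (String × String))) (c : String)
    (f : List (String × String) → Bool)
    (hf : ∀ b, (pvCategory (pvGetType b) == some c) = f b) :
    PySem.Set.contains (cbs.foldl pvAddCat PySem.Set.empty) c = cbs.any f := by
  apply bool_eq_of_iff
  rw [PySem.Set.contains_iff, mem_foldl_pvAddCat, List.any_eq_true]
  simp only [PySem.Set.empty, List.not_mem_nil, false_or]
  constructor
  · rintro ⟨b, hb, hc⟩; exact ⟨b, hb, by rw [← hf b]; exact beq_iff_eq.mpr hc⟩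
  · rintro ⟨b, hb, hc⟩; exact ⟨b, hb, beq_iff_eq.mp (by rw [hf b]; exact hc)⟩

theorem cat_variable (b : List (String × String)) :
    (pvCategory (pvGetType b) == some "variable") = (pvGetType b == some "variable") := by
  unfold pvCategory
  split_ifs with h1 h2 h3 h4 h5 <;>
    simp_all [beq_iff_eq]

theorem cat_function (b : List (String × String)) :
    (pvCategory (pvGetType b) == some "function") = (pvGetType b == some "function") := by
  unfold pvCategory
  split_ifs with h1 h2 h3 h4 h5 <;>
    simp_all [beq_iff_eq]

theorem cat_ui (b : List (String × String)) :
    (pvCategory (pvGetType b) == some "ui") =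
      (pvGetType b == some "button" || pvGetType b == some "input" || pvGetType b == some "slider") := by
  unfold pvCategory
  split_ifs with h1 h2 h3 h4 h5 <;>
    simp_all [beq_iff_eq]

-- ===== VERDICT =====
theorem get_block_suggestions_spec : Claim_equal_get_block_suggestions := by
  intro cbs _
  unfold Spec_get_block_suggestions get_block_suggestions get_block_suggestions_alt pvRules
  simp only [List.filter_cons, List.filter_nil]
  rw [contains_present cbs "variable" _ cat_variable,
      contains_present cbs "function" _ cat_function,
      contains_present cbs "ui" _ cat_ui]
  generalize cbs.any (fun b => pvGetType b == some "variable") = hv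
  generalize cbs.any (fun b => pvGetType b == some "function") = hf
  generalize cbs.any (fun b =>
    pvGetType b == some "button" || pvGetType b == some "input" || pvGetType b == some "slider") = hu
  cases hv <;> cases hf <;> cases hu <;> simp
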